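-- pv_equiv track=rewrite | github.com/harshitagarwal2/polymarket-prediction-agent | forecasting/dashboards.py | _sanitize_markdown_text
-- ===== SOURCE A (Python) =====
-- def _sanitize_markdown_text(value: object) -> str:
--     text = str(value)
--     sanitized = "".join(
--         character
--         for character in text
--         if character in ("\n", "\t") or ord(character) >= 32
--     )
--     sanitized = (
--         sanitized.replace("&", "&amp;")
--         .replace("<", "&lt;")
--         .replace(">", "&gt;")
--         .replace("\\", "\\\\")
--     )
--     for character in ("`", "*", "[", "]", "|"):
--         sanitized = sanitized.replace(character, f"\\{character}")
--     return sanitized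
-- ===== SOURCE B (Python) =====
-- _TABLE = str.maketrans({
--     **{chr(i): None for i in range(32) if i not in (9, 10)},
--     "&": "&amp;",
--     "<": "&lt;",
--     ">": "&gt;",
--     "\\": "\\\\",
--     "`": "\\`",
--     "*": "\\*",
--     "[": "\\[",
--     "]": "\\]",
--     "|": "\\|",
-- })
--
--
-- def _sanitize_markdown_text(value: object) -> str:
--     return str(value).translate(_TABLE)
-- ===== Notes on version B (the rewrite author's own statement) =====
-- stated objective: faster
-- what changed: Replaces the filter pass plus nine sequential full-string .replace scans with one precomputed translation table applied in a single str.translate pass.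
import Mathlib
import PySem

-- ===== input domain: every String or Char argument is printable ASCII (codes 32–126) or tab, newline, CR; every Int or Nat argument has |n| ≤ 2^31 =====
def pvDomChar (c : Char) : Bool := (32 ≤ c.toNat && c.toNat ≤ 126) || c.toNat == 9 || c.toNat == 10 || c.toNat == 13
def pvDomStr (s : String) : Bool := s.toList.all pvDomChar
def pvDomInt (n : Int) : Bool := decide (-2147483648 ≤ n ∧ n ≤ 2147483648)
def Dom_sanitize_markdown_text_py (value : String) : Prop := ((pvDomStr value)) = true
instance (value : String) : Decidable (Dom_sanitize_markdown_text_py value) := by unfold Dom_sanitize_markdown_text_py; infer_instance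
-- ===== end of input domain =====

-- B replaces A's filter pass plus nine sequential full-string replaces by one
-- table-driven left-to-right pass (idiomatic str.translate).

-- ===== PORT A =====
-- filter-then-replace chain, step for step
def sanitize_markdown_text_py (value : String) : String :=
  let text := value
  let sanitized := String.ofList (text.toList.filter
    (fun c => c = '\n' || c = '\t' || decide (32 ≤ c.toNat)))
  let sanitized := PySem.Str.replace (PySem.Str.replace (PySem.Str.replace
    (PySem.Str.replace sanitized "&" "&amp;") "<" "&lt;") ">" "&gt;") "\\" "\\\\"
  let sanitized := ["`", "*", "[", "]", "|"].foldl
    (fun s ch => PySem.Str.replace s ch ("\\" ++ ch)) sanitized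
  sanitized

-- ===== PORT B =====
-- the translation table of Source B as a per-character map (None = delete = [])
def pvTranslateChar (c : Char) : List Char :=
  if c.toNat < 32 && !(c = '\t') && !(c = '\n') then []
  else if c = '&' then "&amp;".toList
  else if c = '<' then "&lt;".toList
  else if c = '>' then "&gt;".toList
  else if c = '\\' then ['\\', '\\']
  else if c = '`' || c = '*' || c = '[' || c = ']' || c = '|' then ['\\', c]
  else [c]

def sanitize_markdown_text_py_alt (value : String) : String :=
  String.ofList (value.toList.flatMap pvTranslateChar)

-- ===== PRECONDITION & SPEC =====
def Spec_sanitize_markdown_text_py (value : String) (out : String) : Prop := out = sanitize_markdown_text_py_alt value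
instance (value : String) (out : String) : Decidable (Spec_sanitize_markdown_text_py value out) := by unfold Spec_sanitize_markdown_text_py; infer_instance

-- ===== CLAIM (what is proved, stated in full; the proofs are below) =====
def Claim_equal_sanitize_markdown_text_py : Prop := ∀ (value : String), Dom_sanitize_markdown_text_py value → Spec_sanitize_markdown_text_py value (sanitize_markdown_text_py value)

-- ===== LEMMAS AND PROOFS =====

-- single-character replace acts pointwise
def pvRep (o : Char) (new : List Char) (c : Char) : List Char :=
  if c = o then new else [c]

theorem pvReplace_go_single (o : Char) (new : List Char) :
    ∀ (cs : List Char) (fuel : Nat) (acc : List Char), cs.length ≤ fuel →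
      PySem.Chars.replace.go [o] new fuel cs acc
        = acc.reverse ++ cs.flatMap (pvRep o new) := by
  intro cs
  induction cs with
  | nil =>
      intro fuel acc _
      cases fuel <;> simp [PySem.Chars.replace.go]
  | cons c t ih =>
      intro fuel acc h
      cases fuel with
      | zero => simp at h
      | succ f =>
          by_cases hc : c = o
          · subst hc
            have hp : List.isPrefixOf [c] (c :: t) = true := by
              simp [List.isPrefixOf]
            simp only [PySem.Chars.replace.go, hp, if_true, List.length_cons,
              List.length_nil, Nat.zero_add, List.drop_succ_cons, List.drop_zero]
            rw [ih f (new.reverse ++ acc) (Nat.le_of_succ_le_succ (by simpa using h))]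
            simp [pvRep]
          · have hp : List.isPrefixOf [o] (c :: t) = false := by
              simp [List.isPrefixOf]
              intro h'; exact absurd h'.symm hc
            simp only [PySem.Chars.replace.go, hp, Bool.false_eq_true, if_false]
            rw [ih f (c :: acc) (Nat.le_of_succ_le_succ (by simpa using h))]
            simp [pvRep, hc]

theorem pvReplace_single (cs : List Char) (o : Char) (new : List Char) :
    PySem.Chars.replace cs [o] new = cs.flatMap (pvRep o new) := by
  have := pvReplace_go_single o new cs cs.length [] (le_refl _)
  simpa [PySem.Chars.replace] using this

theorem pvFilter_eq_flatMap (p : Char → Bool) (cs : List Char) :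
    cs.filter p = cs.flatMap (fun c => if p c then [c] else []) := by
  induction cs with
  | nil => simp
  | cons c t ih => by_cases h : p c <;> simp [List.filter, h, ih]

theorem pvChar_of_toNat (c d : Char) (h : c.toNat = d.toNat) : c = d :=
  Char.ext (UInt32.toNat_inj.mp h)

-- ===== VERDICT (by name: the statement is the Claim_ definition above) =====
theorem sanitize_markdown_text_py_spec : Claim_equal_sanitize_markdown_text_py := by
  intro value hdom
  unfold Spec_sanitize_markdown_text_py sanitize_markdown_text_py sanitize_markdown_text_py_alt
  simp only [List.foldl, PySem.Str.replace, String.toList_ofList]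
  apply congrArg String.ofList
  rw [pvFilter_eq_flatMap]
  simp only [show ("&" : String).toList = ['&'] from rfl,
    show ("<" : String).toList = ['<'] from rfl,
    show (">" : String).toList = ['>'] from rfl,
    show ("\\" : String).toList = ['\\'] from rfl,
    show ("`" : String).toList = ['`'] from rfl,
    show ("*" : String).toList = ['*'] from rfl,
    show ("[" : String).toList = ['['] from rfl,
    show ("]" : String).toList = [']'] from rfl,
    show ("|" : String).toList = ['|'] from rfl]
  simp only [pvReplace_single, List.flatMap_assoc]
  apply List.flatMap_congr
  intro c hc
  have hd : pvDomChar c = true := by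
    have h := hdom
    unfold Dom_sanitize_markdown_text_py pvDomStr at h
    exact List.all_eq_true.mp h c hc
  by_cases h1 : c = '\t'; · rw [h1]; decide
  by_cases h2 : c = '\n'; · rw [h2]; decide
  by_cases h3 : c = '\r'; · rw [h3]; decide
  by_cases h4 : c = '&'; · rw [h4]; decide
  by_cases h5 : c = '<'; · rw [h5]; decide
  by_cases h6 : c = '>'; · rw [h6]; decide
  by_cases h7 : c = '\\'; · rw [h7]; decide
  by_cases h8 : c = '`'; · rw [h8]; decide
  by_cases h9 : c = '*'; · rw [h9]; decide
  by_cases h10 : c = '['; · rw [h10]; decide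
  by_cases h11 : c = ']'; · rw [h11]; decide
  by_cases h12 : c = '|'; · rw [h12]; decide
  -- ordinary printable character: every pass is the identity
  have h32 : 32 ≤ c.toNat := by
    simp [pvDomChar] at hd
    rcases hd with ((h | h) | h) | h
    · exact h.1
    · exact absurd (pvChar_of_toNat c '\t' (by simpa using h)) h1
    · exact absurd (pvChar_of_toNat c '\n' (by simpa using h)) h2
    · exact absurd (pvChar_of_toNat c '\r' (by simpa using h)) h3
  simp [pvRep, pvTranslateChar, h1, h2, h4, h5, h6, h7, h8, h9, h10, h11, h12,
        h32, Nat.not_lt.mpr h32]
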